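-- pv_equiv track=rewrite | github.com/cksdud7007/CodingTest | 프로그래머스/lv2/42586. 기능개발/기능개발.py | solution
-- ===== SOURCE A (Python) =====
-- from collections import deque
--
-- def solution(progresses,speeds):
--     count_list = []
--     for i,v in zip(progresses,speeds):
--         a = i
--         count = 0
--         while True:
--             count += 1
--             a += v
--             if a >= 100:
--                 break
--         count_list.append(count)
--     que = deque()
--     que.extend(count_list)
--     num = que.popleft()
--     new_count = 1
--     new_count_list = []
--     while True:
--         if len (que) == 0:
--             new_count_list.append(new_count)
--             break
--         if num >= que[0]:
--             new_count +=1
--             que.popleft()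
--         else:
--             new_count_list.append(new_count)
--             num = que.popleft()
--             new_count = 1
--
--     return  new_count_list
-- ===== SOURCE B (Python) =====
-- def solution(progresses, speeds):
--     # closed-form days per task + run-length grouping by prefix maximum (one pass)
--     res = []
--     cur_max = None
--     for p, s in zip(progresses, speeds):
--         d = max(1, -((p - 100) // s)) if s > 0 else 1
--         if cur_max is None or d > cur_max:
--             cur_max = d
--             res.append(1)
--         else:
--             res[-1] += 1
--     return res
-- ===== Notes on version B (the rewrite author's own statement) =====
-- stated objective: faster
-- what changed: Replaces the per-task count-up while-loop with a closed-form ceiling division and replaces the deque-based grouping with a single pass that run-length-encodes the prefix maximum of the days, appending 1 for a new group and incrementing the last count otherwise.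
import Mathlib
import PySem

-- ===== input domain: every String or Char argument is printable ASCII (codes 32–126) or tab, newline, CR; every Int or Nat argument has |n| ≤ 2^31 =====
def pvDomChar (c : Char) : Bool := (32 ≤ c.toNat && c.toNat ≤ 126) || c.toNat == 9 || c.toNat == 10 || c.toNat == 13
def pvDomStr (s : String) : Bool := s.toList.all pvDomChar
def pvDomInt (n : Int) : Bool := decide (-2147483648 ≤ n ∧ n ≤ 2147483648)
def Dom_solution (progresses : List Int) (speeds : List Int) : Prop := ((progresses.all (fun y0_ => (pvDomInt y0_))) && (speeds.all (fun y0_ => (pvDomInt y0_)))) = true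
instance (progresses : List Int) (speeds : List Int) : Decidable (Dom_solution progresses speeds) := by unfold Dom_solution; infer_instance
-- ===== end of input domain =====

-- B replaces A's per-task count-up loop by a closed-form ceiling division and the deque
-- grouping by a one-pass run-length encoding of the prefix maximum (faster: no count-up loop).
-- ===== PORT A =====
-- inner 'while True' of A: count += 1; a += v; break when a >= 100.
-- The fuel argument only makes the recursion total; under Pre_solution it never runs out.
def loopA : Nat → Int → Int → Int → Int
  | 0, count, _, _ => count
  | fuel + 1, count, a, v => if a + v ≥ 100 then count + 1 else loopA fuel (count + 1) (a + v) v

-- A's second while loop over the deque (que, num, new_count, new_count_list)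
def groupA : List Int → Int → Int → List Int → List Int
  | [], _, newCount, acc => acc ++ [newCount]
  | q0 :: rest, num, newCount, acc =>
      if num ≥ q0 then groupA rest num (newCount + 1) acc
      else groupA rest q0 1 (acc ++ [newCount])

def solution (progresses : List Int) (speeds : List Int) : List Int :=
  let countList := (progresses.zip speeds).map (fun iv => loopA ((100 - iv.1).toNat + 1) 0 iv.1 iv.2)
  match countList with
  | [] => []  -- unreachable under Pre_solution: Python raises IndexError here
  | num :: que => groupA que num 1 []

-- ===== PORT B =====
-- days for one task: max(1, -((p - 100) // s)) if s > 0 else 1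
def daysB (p s : Int) : Int := if s > 0 then max 1 (-(PySem.Int.floordiv (p - 100) s)) else 1

-- res[-1] += 1
def incLast : List Int → List Int
  | [] => []
  | [x] => [x + 1]
  | x :: rest => x :: incLast rest

-- B's single pass over the zipped pairs, tracking cur_max and res
def groupB : List (Int × Int) → Option Int → List Int → List Int
  | [], _, res => res
  | ps :: rest, curMax, res =>
      let d := daysB ps.1 ps.2
      match curMax with
      | none => groupB rest (some d) (res ++ [1])
      | some m => if d > m then groupB rest (some d) (res ++ [1])
                  else groupB rest (some m) (incLast res)

def solution_alt (progresses : List Int) (speeds : List Int) : List Int :=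
  groupB (progresses.zip speeds) none []

-- ===== PRECONDITION & SPEC =====
-- Pre_: exactly the inputs on which A returns: at least one zipped pair (else IndexError on
-- popleft) and each zipped pair terminates its count-up loop (speed ≥ 1, or done after one step).
def Pre_solution (progresses : List Int) (speeds : List Int) : Prop :=
  progresses.zip speeds ≠ [] ∧
  ∀ iv ∈ progresses.zip speeds, iv.2 ≥ 1 ∨ iv.1 + iv.2 ≥ 100
instance (progresses : List Int) (speeds : List Int) : Decidable (Pre_solution progresses speeds) := by
  unfold Pre_solution; infer_instance

def pvWitness_solution : List Int × List Int := ([93, 30, 55], [1, 30, 5])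

def Spec_solution (progresses : List Int) (speeds : List Int) (out : List Int) : Prop := out = solution_alt progresses speeds
instance (progresses : List Int) (speeds : List Int) (out : List Int) : Decidable (Spec_solution progresses speeds out) := by unfold Spec_solution; infer_instance

-- ===== CLAIM (what is proved, stated in full; the proofs are below) =====
def Claim_equal_solution : Prop := ∀ (progresses : List Int) (speeds : List Int), Dom_solution progresses speeds → Pre_solution progresses speeds → Spec_solution progresses speeds (solution progresses speeds)

-- ===== LEMMAS AND PROOFS =====

-- A's count-up loop equals B's closed form on terminating pairs (with enough fuel).
theorem loopA_eq_daysB (fuel : Nat) (count p v : Int) (hfuel : (100 - p).toNat < fuel)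
    (h : v ≥ 1 ∨ p + v ≥ 100) : loopA fuel count p v = count + daysB p v := by
  induction fuel generalizing count p with
  | zero => omega
  | succ n ih =>
    by_cases hb : p + v ≥ 100
    · -- loop stops after one step; closed form is 1
      simp only [loopA, if_pos hb, daysB]
      rcases lt_or_ge 0 v with hv | hv
      · rw [if_pos hv]
        have h2 : -1 ≤ PySem.Int.floordiv (p - 100) v := by
          rw [PySem.Int.le_floordiv_iff_mul_le hv]; linarith
        omega
      · rw [if_neg (by omega)]
    · have hv : v ≥ 1 := by rcases h with h | h; exact h; omega
      simp only [loopA, if_neg hb]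
      rw [ih (count + 1) (p + v) (by omega) (Or.inl hv)]
      simp only [daysB, if_pos (by omega : (0:Int) < v)]
      have hv0 : (0:Int) < v := by omega
      -- ceil((100-p)/v) and ceil((100-p-v)/v) via floordiv brackets
      have key : PySem.Int.floordiv (p + v - 100) v = PySem.Int.floordiv (p - 100) v + 1 := by
        have := PySem.Int.floordiv_mul_add_mod (p - 100) v
        have hm0 : 0 ≤ PySem.Int.mod (p - 100) v := PySem.Int.mod_nonneg _ hv0
        have hmv : PySem.Int.mod (p - 100) v < v := PySem.Int.mod_lt _ hv0
        rw [PySem.Int.floordiv_eq_iff_of_pos hv0]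
        constructor <;> nlinarith [PySem.Int.floordiv_mul_add_mod (p - 100) v]
      have hq : -(PySem.Int.floordiv (p - 100) v) ≥ 2 := by
        -- p + v < 100 ⇒ floordiv (p-100) v ≤ -2
        have : PySem.Int.floordiv (p - 100) v < -1 := by
          rw [PySem.Int.floordiv_lt_iff_lt_mul hv0]; omega
        omega
      rw [key]; omega

-- incrementing the last element of acc ++ [c]
theorem incLast_append (acc : List Int) (c : Int) : incLast (acc ++ [c]) = acc ++ [c + 1] := by
  induction acc with
  | nil => rfl
  | cons x xs ih =>
    cases xs with
    | nil => simp [incLast]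
    | cons y ys => simpa [incLast] using ih

-- A's grouping over the days list equals B's running pass, via the invariant that
-- A's current group lead 'num' is the running maximum and 'cnt' the current run length.
theorem groupA_eq_groupB (pairs : List (Int × Int)) (num cnt : Int) (acc : List Int) :
    groupA (pairs.map (fun iv => daysB iv.1 iv.2)) num cnt acc
      = groupB pairs (some num) (acc ++ [cnt]) := by
  induction pairs generalizing num cnt acc with
  | nil => simp [groupA, groupB]
  | cons iv rest ih =>
    simp only [List.map, groupA, groupB]
    by_cases hle : num ≥ daysB iv.1 iv.2
    · rw [if_pos hle, if_neg (by omega), incLast_append, ih]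
    · rw [if_neg hle, if_pos (by omega), ih]

theorem solution_eq (progresses speeds : List Int) (h : Pre_solution progresses speeds) :
    solution progresses speeds = solution_alt progresses speeds := by
  obtain ⟨hne, hall⟩ := h
  unfold solution solution_alt
  have hmap : (progresses.zip speeds).map (fun iv => loopA ((100 - iv.1).toNat + 1) 0 iv.1 iv.2)
      = (progresses.zip speeds).map (fun iv => daysB iv.1 iv.2) := by
    apply List.map_congr_left
    intro iv hiv
    rw [loopA_eq_daysB _ 0 iv.1 iv.2 (by omega) (hall iv hiv)]; omega
  rw [hmap]
  cases hz : progresses.zip speeds with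
  | nil => exact absurd hz hne
  | cons iv rest =>
    simp only [List.map, groupB]
    rw [groupA_eq_groupB]

-- ===== VERDICT (by name: the statement is the Claim_ definition above) =====
theorem solution_spec : Claim_equal_solution := by
  intro progresses speeds _ hpre
  unfold Spec_solution
  exact solution_eq progresses speeds hpre
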